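-- pv_equiv track=rewrite | github.com/gaviral/career-automation | _archive/1_archived_applications/14_Vooban/1_Agent_Developer/potential_project/iteration_02_documentation_lookup/scott.py | extract_relevant_section
-- ===== SOURCE A (Python) =====
-- def extract_keywords(text):
--     """
--     Extract keywords from text (simple word splitting).
--
--     Args:
--         text (str): Input text
--
--     Returns:
--         list: List of lowercase keywords (3+ characters)
--     """
--     # Simple keyword extraction: split on whitespace and remove short words
--     words = text.lower().split()
--     keywords = [w for w in words if len(w) >= 3]
--     return keywords
--
-- def extract_relevant_section(content, question, max_chars=500):
--     """
--     Extract the most relevant section from documentation.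
--
--     Args:
--         content (str): Full documentation content
--         question (str): User's question
--         max_chars (int): Maximum characters to return
--
--     Returns:
--         str: Relevant section of documentation
--     """
--     keywords = extract_keywords(question)
--     lines = content.split('\n')
--
--     # Find first line containing any keyword
--     start_idx = 0
--     for i, line in enumerate(lines):
--         line_lower = line.lower()
--         if any(keyword in line_lower for keyword in keywords):
--             # Start a few lines before the match for context
--             start_idx = max(0, i - 2)
--             break
--
--     # Extract section starting from that line
--     section_lines = lines[start_idx:start_idx + 20]  # Get ~20 lines
--     section = '\n'.join(section_lines)
--
--     # Truncate if too long
--     if len(section) > max_chars: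
--         section = section[:max_chars] + "..."
--
--     return section
-- ===== SOURCE B (Python) =====
-- def _first_hit(kw, lowered):
--     for i, line in enumerate(lowered):
--         if kw in line:
--             return i
--     return None
--
-- def extract_relevant_section(content, question, max_chars=500):
--     lines = content.split('\n')
--     lowered = [line.lower() for line in lines]
--     keywords = [w for w in question.lower().split() if len(w) >= 3]
--     candidates = [i for i in (_first_hit(kw, lowered) for kw in keywords) if i is not None]
--     start_idx = max(0, min(candidates) - 2) if candidates else 0
--     section = '\n'.join(lines[start_idx:start_idx + 20])
--     return section if len(section) <= max_chars else section[:max_chars] + "..."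
-- ===== Notes on version B (the rewrite author's own statement) =====
-- stated objective: alternative
-- what changed: A scans lines in order testing every keyword against each line until the first match; B transposes the loops: it computes each keyword's first matching line index independently (over a once-lowered line list) and takes the minimum, proved to equal A's first-match index.
import Mathlib
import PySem

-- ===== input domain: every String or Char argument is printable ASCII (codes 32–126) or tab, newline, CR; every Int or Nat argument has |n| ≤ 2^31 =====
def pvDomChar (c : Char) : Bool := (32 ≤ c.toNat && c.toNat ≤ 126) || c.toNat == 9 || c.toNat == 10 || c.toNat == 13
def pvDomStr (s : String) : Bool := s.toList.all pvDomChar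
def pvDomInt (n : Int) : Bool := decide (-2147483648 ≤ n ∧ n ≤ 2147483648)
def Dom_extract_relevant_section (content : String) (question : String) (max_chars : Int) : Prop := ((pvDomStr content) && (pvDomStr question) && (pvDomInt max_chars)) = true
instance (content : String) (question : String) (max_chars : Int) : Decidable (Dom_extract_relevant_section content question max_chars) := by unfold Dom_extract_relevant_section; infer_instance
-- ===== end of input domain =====

-- B replaces A's per-line scan (each line tested against every keyword until the first
-- matching line) by a per-keyword scan (first matching line index of each keyword, then
-- the minimum); alternative decomposition, same exact return value.

-- ===== PORT A =====
-- extract_keywords: [w for w in text.lower().split() if len(w) >= 3]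
def pvExtractKeywords (text : String) : List (List Char) :=
  (PySem.Chars.split₀ (PySem.Chars.lower text.toList)).filter (fun w => decide (3 ≤ w.length))

-- A's loop: for i, line in enumerate(lines): if any(kw in line.lower()): start_idx = max(0, i-2); break
def pvLoopA (kws : List (List Char)) : List (List Char) → Nat → Int
  | [], _ => 0
  | line :: rest, i =>
    if kws.any (fun k => PySem.Chars.isIn k (PySem.Chars.lower line)) then max 0 ((i : Int) - 2)
    else pvLoopA kws rest (i + 1)

-- section = '\n'.join(lines[start:start+20]); truncate to max_chars with "..."
def pvRestA (lines : List (List Char)) (start_idx : Int) (max_chars : Int) : String :=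
  let sect := PySem.Chars.join ['\n'] (PySem.List.slice lines (some start_idx) (some (start_idx + 20)))
  if (sect.length : Int) > max_chars then
    String.ofList (PySem.List.slice sect none (some max_chars) ++ ['.', '.', '.'])
  else String.ofList sect

def extract_relevant_section (content : String) (question : String) (max_chars : Int) : String :=
  let keywords := pvExtractKeywords question
  let lines := PySem.Chars.splitOn content.toList ['\n']
  pvRestA lines (pvLoopA keywords lines 0) max_chars

-- ===== PORT B =====
-- _first_hit(kw, lowered): first index of a (pre-lowered) line containing kw, else None
def pvFirstHit (kw : List Char) : List (List Char) → Nat → Option Nat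
  | [], _ => none
  | line :: rest, i => if PySem.Chars.isIn kw line then some i else pvFirstHit kw rest (i + 1)

-- section if len(section) <= max_chars else section[:max_chars] + "..."
def pvRestB (lines : List (List Char)) (start_idx : Int) (max_chars : Int) : String :=
  let sect := PySem.Chars.join ['\n'] (PySem.List.slice lines (some start_idx) (some (start_idx + 20)))
  if (sect.length : Int) ≤ max_chars then String.ofList sect
  else String.ofList (PySem.List.slice sect none (some max_chars) ++ ['.', '.', '.'])

def extract_relevant_section_alt (content : String) (question : String) (max_chars : Int) : String :=
  let lines := PySem.Chars.splitOn content.toList ['\n']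
  let lowered := lines.map PySem.Chars.lower
  let keywords := (PySem.Chars.split₀ (PySem.Chars.lower question.toList)).filter (fun w => decide (3 ≤ w.length))
  let candidates := keywords.filterMap (fun kw => pvFirstHit kw lowered 0)
  let start_idx : Int :=
    match candidates.min? with
    | some m => max 0 ((m : Int) - 2)
    | none => 0
  pvRestB lines start_idx max_chars

-- ===== PRECONDITION & SPEC =====
def Spec_extract_relevant_section (content : String) (question : String) (max_chars : Int) (out : String) : Prop := out = extract_relevant_section_alt content question max_chars
instance (content : String) (question : String) (max_chars : Int) (out : String) : Decidable (Spec_extract_relevant_section content question max_chars out) := by unfold Spec_extract_relevant_section; infer_instance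

-- ===== CLAIM (what is proved, stated in full; the proofs are below) =====
def Claim_equal_extract_relevant_section : Prop := ∀ (content : String) (question : String) (max_chars : Int), Dom_extract_relevant_section content question max_chars → Spec_extract_relevant_section content question max_chars (extract_relevant_section content question max_chars)

-- ===== LEMMAS AND PROOFS =====

theorem pvRestAB (l : List (List Char)) (s m : Int) : pvRestA l s m = pvRestB l s m := by
  simp only [pvRestA, pvRestB]
  split_ifs with h1 h2 <;> first | rfl | omega

theorem pvLoopA_eq (kws : List (List Char)) : ∀ (ls : List (List Char)) (n : Nat),
    pvLoopA kws ls n =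
      match List.findIdx? (fun l => kws.any (fun k => PySem.Chars.isIn k (PySem.Chars.lower l))) ls with
      | some i => max 0 ((n : Int) + i - 2)
      | none => 0 := by
  intro ls
  induction ls with
  | nil => intro n; simp [pvLoopA]
  | cons line rest ih =>
    intro n
    by_cases h : kws.any (fun k => PySem.Chars.isIn k (PySem.Chars.lower line)) = true
    · simp [pvLoopA, h, List.findIdx?_cons]
    · simp only [pvLoopA, h, List.findIdx?_cons, ih (n + 1)]
      cases hf : List.findIdx? (fun l => kws.any fun k => PySem.Chars.isIn k (PySem.Chars.lower l)) rest with
      | none => simp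
      | some i =>
        simp only [Option.map_some]
        have : ((n : Int) + 1) + i - 2 = (n : Int) + (i + 1 : Nat) - 2 := by push_cast; ring
        push_cast
        ring_nf

theorem pvFirstHit_eq (kw : List Char) : ∀ (ls : List (List Char)) (n : Nat),
    pvFirstHit kw ls n = (List.findIdx? (fun l => PySem.Chars.isIn kw l) ls).map (fun i => n + i) := by
  intro ls
  induction ls with
  | nil => intro n; simp [pvFirstHit]
  | cons line rest ih =>
    intro n
    by_cases h : PySem.Chars.isIn kw line = true
    · simp [pvFirstHit, h, List.findIdx?_cons]
    · simp only [pvFirstHit, h, List.findIdx?_cons, ih (n + 1)]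
      cases List.findIdx? (fun l => PySem.Chars.isIn kw l) rest with
      | none => rfl
      | some i => simp; omega

theorem pvMinMapSucc (xs : List Nat) : (xs.map (· + 1)).min? = xs.min?.map (· + 1) := by
  induction xs with
  | nil => simp
  | cons x t ih =>
    simp only [List.map_cons, List.min?_cons, ih]
    cases t.min? with
    | none => simp
    | some y => simp [Nat.succ_min_succ]

theorem pvMinZero (xs : List Nat) (h : 0 ∈ xs) : xs.min? = some 0 := by
  rw [List.min?_eq_some_iff]
  exact ⟨h, fun b _ => Nat.zero_le b⟩

theorem pvCore {α β : Type} (kws : List β) (pred : β → α → Bool) : ∀ (ls : List α),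
    (kws.filterMap (fun kw => List.findIdx? (fun l => pred kw l) ls)).min?
      = List.findIdx? (fun l => kws.any (fun kw => pred kw l)) ls := by
  intro ls
  induction ls with
  | nil => simp
  | cons l t ih =>
    by_cases h : kws.any (fun kw => pred kw l) = true
    · rw [List.findIdx?_cons]
      simp only [h, if_true]
      obtain ⟨kw, hmem, hin⟩ := List.any_eq_true.mp h
      apply pvMinZero
      refine List.mem_filterMap.mpr ⟨kw, hmem, ?_⟩
      rw [List.findIdx?_cons]
      simp [hin]
    · have h' : ∀ kw ∈ kws, pred kw l = false := by
        intro kw hkw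
        by_contra hc
        exact h (List.any_eq_true.mpr ⟨kw, hkw, by simpa using hc⟩)
      rw [List.findIdx?_cons]
      simp only [h]
      have hcong : kws.filterMap (fun kw => List.findIdx? (fun l' => pred kw l') (l :: t))
          = kws.filterMap (fun kw => (List.findIdx? (fun l' => pred kw l') t).map (· + 1)) := by
        apply List.filterMap_congr
        intro kw hkw
        rw [List.findIdx?_cons, h' kw hkw]
        rfl
      rw [hcong, ← List.map_filterMap, pvMinMapSucc, ih]
      rfl

theorem pvStart_eq (kws ls : List (List Char)) :
    pvLoopA kws ls 0 =
      (match (kws.filterMap (fun kw => pvFirstHit kw (ls.map PySem.Chars.lower) 0)).min? with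
       | some m => max 0 ((m : Int) - 2)
       | none => 0) := by
  have hfh : (fun kw => pvFirstHit kw (ls.map PySem.Chars.lower) 0)
      = fun kw => List.findIdx? (fun l => PySem.Chars.isIn kw (PySem.Chars.lower l)) ls := by
    funext kw
    rw [pvFirstHit_eq, List.findIdx?_map]
    simp [Function.comp_def]
  rw [hfh]
  have := pvCore kws (fun kw l => PySem.Chars.isIn kw (PySem.Chars.lower l)) ls
  rw [this, pvLoopA_eq kws ls 0]
  cases List.findIdx? (fun l => kws.any fun kw => PySem.Chars.isIn kw (PySem.Chars.lower l)) ls with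
  | none => rfl
  | some i => simp

-- ===== VERDICT (by name: the statement is the Claim_ definition above) =====
theorem extract_relevant_section_spec : Claim_equal_extract_relevant_section := by
  intro content question max_chars _
  unfold Spec_extract_relevant_section extract_relevant_section extract_relevant_section_alt
  simp only [pvExtractKeywords, pvRestAB]
  rw [pvStart_eq]
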